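-- pv_equiv track=rewrite | github.com/tripping-alien/shortlink | mymath.py | _from_bijective_base6_py
-- ===== SOURCE A (Python) =====
-- def _from_bijective_base6_py(s: str) -> int:
--     if not s or not s.isalnum():
--         raise ValueError("Invalid short code format")
--     n = 0
--     for char in s:
--         try:
--             n = n * 6 + "123456".index(char) + 1
--         except ValueError:
--             raise ValueError("Invalid character in short code")
--     return n
-- ===== SOURCE B (Python) =====
-- def _from_bijective_base6_py(s: str) -> int:
--     if not s or not s.isalnum():
--         raise ValueError("Invalid short code format")
--     n = 0
--     power = 1
--     for char in reversed(s):
--         try: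
--             d = "123456".index(char) + 1
--         except ValueError:
--             raise ValueError("Invalid character in short code")
--         n += d * power
--         power *= 6
--     return n
-- ===== Notes on version B (the rewrite author's own statement) =====
-- stated objective: alternative
-- what changed: Replaces Horner's left-to-right accumulation (n = n*6 + digit) with a right-to-left positional-weight expansion that maintains a running power of 6 and adds digit*power per character.
import Mathlib
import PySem

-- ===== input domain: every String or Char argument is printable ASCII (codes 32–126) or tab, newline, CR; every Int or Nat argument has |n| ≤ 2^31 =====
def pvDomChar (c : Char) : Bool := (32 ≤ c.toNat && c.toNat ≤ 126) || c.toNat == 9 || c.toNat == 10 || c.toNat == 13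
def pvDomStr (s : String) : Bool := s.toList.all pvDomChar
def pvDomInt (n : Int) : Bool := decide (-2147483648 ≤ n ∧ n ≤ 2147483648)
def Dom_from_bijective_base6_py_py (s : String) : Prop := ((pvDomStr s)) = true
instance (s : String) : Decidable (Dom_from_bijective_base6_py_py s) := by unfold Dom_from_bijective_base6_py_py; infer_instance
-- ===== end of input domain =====

-- B replaces A's Horner left-to-right accumulation by a reversed positional-weight
-- expansion with a running power of 6 (objective: alternative decomposition, same cost).

-- ===== PORT A =====
-- digit value of c in A's loop body: "123456".index(char) + 1; the .index ValueError
-- (c outside the digit alphabet) is excluded by Pre_, where index? = none and getD 0 is unused.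
def pvDig (c : Char) : Int := (((PySem.List.index? "123456".toList c).getD 0 : Int)) + 1

def from_bijective_base6_py_py (s : String) : Int :=
  if s.toList.isEmpty || !(PySem.Str.strIsalnum s) then 0   -- A raises ValueError here; excluded by Pre_
  else s.toList.foldl (fun n c => n * 6 + pvDig c) 0

-- ===== PORT B =====
def from_bijective_base6_py_py_alt (s : String) : Int :=
  if s.toList.isEmpty || !(PySem.Str.strIsalnum s) then 0   -- B raises ValueError here; excluded by Pre_
  else
    (s.toList.reverse.foldl
      (fun (np : Int × Int) c => (np.1 + pvDig c * np.2, np.2 * 6)) ((0 : Int), (1 : Int))).1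

-- ===== PRECONDITION & SPEC =====
-- exactly the inputs where Python A returns: nonempty and every character drawn from the bijective-base-6 digit alphabet
def Pre_from_bijective_base6_py_py (s : String) : Prop :=
  s.toList ≠ [] ∧ (s.toList.all (fun c => "123456".toList.contains c)) = true
instance (s : String) : Decidable (Pre_from_bijective_base6_py_py s) := by
  unfold Pre_from_bijective_base6_py_py; infer_instance
def pvWitness_from_bijective_base6_py_py : String := "1625"

def Spec_from_bijective_base6_py_py (s : String) (out : Int) : Prop := out = from_bijective_base6_py_py_alt s
instance (s : String) (out : Int) : Decidable (Spec_from_bijective_base6_py_py s out) := by unfold Spec_from_bijective_base6_py_py; infer_instance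

-- ===== CLAIM (what is proved, stated in full; the proofs are below) =====
def Claim_equal_from_bijective_base6_py_py : Prop := ∀ (s : String), Dom_from_bijective_base6_py_py s → Pre_from_bijective_base6_py_py s → Spec_from_bijective_base6_py_py s (from_bijective_base6_py_py s)

-- ===== LEMMAS AND PROOFS =====

-- little-endian value of a digit list: head has weight 1
def pvW : List Char → Int
  | [] => 0
  | c :: t => pvDig c + 6 * pvW t

theorem pvW_append_singleton (l : List Char) (c : Char) :
    pvW (l ++ [c]) = pvW l + 6 ^ l.length * pvDig c := by
  induction l with
  | nil => simp [pvW]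
  | cons x t ih => simp [pvW, ih, pow_succ]; ring

theorem pvA_fold (l : List Char) (n : Int) :
    l.foldl (fun n c => n * 6 + pvDig c) n = n * 6 ^ l.length + pvW l.reverse := by
  induction l generalizing n with
  | nil => simp [pvW]
  | cons c t ih =>
    simp only [List.foldl_cons, ih, List.reverse_cons, pvW_append_singleton,
      List.length_reverse, List.length_cons, pow_succ]
    ring

theorem pvB_fold (l : List Char) (n p : Int) :
    l.foldl (fun (np : Int × Int) c => (np.1 + pvDig c * np.2, np.2 * 6)) (n, p)
      = (n + p * pvW l, p * 6 ^ l.length) := by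
  induction l generalizing n p with
  | nil => simp [pvW]
  | cons c t ih =>
    simp only [List.foldl_cons, ih, pvW, List.length_cons, pow_succ]
    exact Prod.ext (by ring) (by ring)

-- ===== VERDICT (by name: the statement is the Claim_ definition above) =====
theorem from_bijective_base6_py_py_spec : Claim_equal_from_bijective_base6_py_py := by
  intro s _ _
  unfold Spec_from_bijective_base6_py_py from_bijective_base6_py_py from_bijective_base6_py_py_alt
  split
  · rfl
  · rw [pvA_fold, pvB_fold]; simp
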